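-- pv_equiv track=rewrite | github.com/thatcatxedo/fastapi-platform | backend/deployment/apps.py | derive_deployment_phase
-- ===== SOURCE A (Python) =====
-- def derive_deployment_phase(events: list) -> str:
--     """Derive user-friendly deployment phase from K8s events"""
--     reasons = {e.get("reason") for e in events if e.get("reason")}
--     has_warning = any(e.get("type") == "Warning" for e in events)
--
--     # Check for error conditions first
--     error_reasons = {"Failed", "BackOff", "FailedScheduling", "FailedMount", "FailedCreate"}
--     if reasons & error_reasons or has_warning:
--         return "error"
--
--     # Progress through deployment phases
--     if "Started" in reasons:
--         return "starting"
--     if "Created" in reasons: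
--         return "creating"
--     if "Pulled" in reasons:
--         return "pulled"
--     if "Pulling" in reasons:
--         return "pulling"
--     if "Scheduled" in reasons:
--         return "scheduled"
--
--     return "pending"
-- ===== SOURCE B (Python) =====
-- _RANK = {"Failed": 0, "BackOff": 0, "FailedScheduling": 0, "FailedMount": 0, "FailedCreate": 0,
--          "Started": 1, "Created": 2, "Pulled": 3, "Pulling": 4, "Scheduled": 5}
-- _PHASES = ["error", "starting", "creating", "pulled", "pulling", "scheduled", "pending"]
--
--
-- def derive_deployment_phase(events: list) -> str:
--     """Derive user-friendly deployment phase from K8s events"""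
--     rank = 6  # sentinel: no known reason seen -> "pending"
--     for e in events:
--         if e.get("type") == "Warning":
--             rank = 0
--         r = e.get("reason")
--         if r and r in _RANK:
--             rank = min(rank, _RANK[r])
--     return _PHASES[rank]
-- ===== Notes on version B (the rewrite author's own statement) =====
-- stated objective: alternative
-- what changed: Replaces the set comprehension plus ordered membership-test cascade by a single fold that keeps a running minimum priority rank per event (error=0 .. scheduled=5, sentinel 6) and maps the final rank to its phase string.
import Mathlib
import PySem

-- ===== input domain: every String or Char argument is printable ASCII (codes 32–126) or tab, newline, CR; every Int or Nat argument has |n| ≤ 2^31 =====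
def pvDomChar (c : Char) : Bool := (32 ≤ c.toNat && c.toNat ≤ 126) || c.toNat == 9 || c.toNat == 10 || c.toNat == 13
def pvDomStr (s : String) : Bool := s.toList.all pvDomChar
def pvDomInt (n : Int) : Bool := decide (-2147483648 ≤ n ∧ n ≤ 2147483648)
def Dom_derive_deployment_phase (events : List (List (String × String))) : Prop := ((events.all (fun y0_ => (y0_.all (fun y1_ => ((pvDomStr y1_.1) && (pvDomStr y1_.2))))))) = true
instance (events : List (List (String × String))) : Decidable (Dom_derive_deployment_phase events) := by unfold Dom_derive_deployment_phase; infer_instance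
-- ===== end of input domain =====

-- B replaces A's set comprehension + ordered membership cascade by a one-pass running-minimum
-- of per-event priority ranks (alternative decomposition, same O(n) cost).

-- ===== PORT A =====
-- e.get(k) on the event dict (first match, None -> none)
def evGet (e : List (String × String)) (k : String) : Option String :=
  (PySem.Dict.mk e).get? k

def error_reasons : PySem.Set String :=
  PySem.Set.ofList ["Failed", "BackOff", "FailedScheduling", "FailedMount", "FailedCreate"]

-- {e.get("reason") for e in events if e.get("reason")}  (truthy = some nonempty string)
def reasonsOf (events : List (List (String × String))) : PySem.Set String :=
  PySem.Set.ofList (events.filterMap (fun e =>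
    match evGet e "reason" with
    | some s => if s = "" then none else some s
    | none => none))

def derive_deployment_phase (events : List (List (String × String))) : String :=
  let reasons := reasonsOf events
  let has_warning := events.any (fun e => evGet e "type" == some "Warning")
  if !(PySem.Set.inter reasons error_reasons).isEmpty || has_warning then "error"
  else if PySem.Set.contains reasons "Started" then "starting"
  else if PySem.Set.contains reasons "Created" then "creating"
  else if PySem.Set.contains reasons "Pulled" then "pulled"
  else if PySem.Set.contains reasons "Pulling" then "pulling"
  else if PySem.Set.contains reasons "Scheduled" then "scheduled"
  else "pending"

-- ===== PORT B =====
def rankTable : PySem.Dict String Nat :=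
  PySem.Dict.mk [("Failed", 0), ("BackOff", 0), ("FailedScheduling", 0), ("FailedMount", 0),
    ("FailedCreate", 0), ("Started", 1), ("Created", 2), ("Pulled", 3), ("Pulling", 4), ("Scheduled", 5)]

def phases : List String :=
  ["error", "starting", "creating", "pulled", "pulling", "scheduled", "pending"]

-- one loop iteration of Source B
def stepRank (rank : Nat) (e : List (String × String)) : Nat :=
  let rank := if evGet e "type" == some "Warning" then 0 else rank
  match evGet e "reason" with
  | some r => if r ≠ "" && rankTable.contains r then min rank (rankTable.getD r 6) else rank
  | none => rank

def derive_deployment_phase_alt (events : List (List (String × String))) : String :=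
  -- _PHASES[rank]; the index is always < 7, so getD is exactly Python's list indexing here
  phases.getD (events.foldl stepRank 6) ""

-- ===== PRECONDITION & SPEC =====
def Spec_derive_deployment_phase (events : List (List (String × String))) (out : String) : Prop := out = derive_deployment_phase_alt events
instance (events : List (List (String × String))) (out : String) : Decidable (Spec_derive_deployment_phase events out) := by unfold Spec_derive_deployment_phase; infer_instance

-- ===== CLAIM (what is proved, stated in full; the proofs are below) =====
def Claim_equal_derive_deployment_phase : Prop := ∀ (events : List (List (String × String))), Dom_derive_deployment_phase events → Spec_derive_deployment_phase events (derive_deployment_phase events)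

-- ===== LEMMAS AND PROOFS =====

def errList : List String := ["Failed", "BackOff", "FailedScheduling", "FailedMount", "FailedCreate"]

-- clean cascade form of the table lookup
def rk (r : String) : Nat :=
  if r ∈ errList then 0
  else if r = "Started" then 1
  else if r = "Created" then 2
  else if r = "Pulled" then 3
  else if r = "Pulling" then 4
  else if r = "Scheduled" then 5
  else 6

lemma look_eq (r : String) :
    (if r ≠ "" && rankTable.contains r then min 6 (rankTable.getD r 6) else 6) = rk r := by
  by_cases h1 : r = "Failed"; · subst h1; decide
  by_cases h2 : r = "BackOff"; · subst h2; decide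
  by_cases h3 : r = "FailedScheduling"; · subst h3; decide
  by_cases h4 : r = "FailedMount"; · subst h4; decide
  by_cases h5 : r = "FailedCreate"; · subst h5; decide
  by_cases h6 : r = "Started"; · subst h6; decide
  by_cases h7 : r = "Created"; · subst h7; decide
  by_cases h8 : r = "Pulled"; · subst h8; decide
  by_cases h9 : r = "Pulling"; · subst h9; decide
  by_cases h10 : r = "Scheduled"; · subst h10; decide
  have hc : rankTable.contains r = false := by
    simp only [rankTable, PySem.Dict.contains_mk]
    simp only [List.any_cons, List.any_nil, Bool.or_eq_false_iff, beq_eq_false_iff_ne, ne_eq]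
    exact ⟨fun h => h1 h.symm, fun h => h2 h.symm, fun h => h3 h.symm, fun h => h4 h.symm,
      fun h => h5 h.symm, fun h => h6 h.symm, fun h => h7 h.symm, fun h => h8 h.symm,
      fun h => h9 h.symm, fun h => h10 h.symm, trivial⟩
  simp [hc, rk, errList, h1, h2, h3, h4, h5, h6, h7, h8, h9, h10]

-- per-event rank contributed by Source B's loop body
def gRank (e : List (String × String)) : Nat :=
  min (if evGet e "type" == some "Warning" then 0 else 6)
    (match evGet e "reason" with
     | some r => rk r
     | none => 6)

def Mrank (events : List (List (String × String))) : Nat :=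
  events.foldr (fun e m => min (gRank e) m) 6

lemma rk_le (r : String) : rk r ≤ 6 := by
  unfold rk; split_ifs <;> omega

lemma step_eq_min (r : Nat) (e : List (String × String)) (h : r ≤ 6) :
    stepRank r e = min r (gRank e) := by
  unfold stepRank gRank
  cases hR : evGet e "reason" with
  | none =>
    cases hW : (evGet e "type" == some "Warning") <;> simp <;> omega
  | some s =>
    have hl := look_eq s
    have h6 : min 6 (rk s) = rk s := min_eq_right (rk_le s)
    cases hW : (evGet e "type" == some "Warning") <;> simp only [if_pos, if_neg, ite_true, ite_false] <;>
      split_ifs at hl ⊢ <;> simp_all <;> omega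

lemma foldl_step (events : List (List (String × String))) (r : Nat) (h : r ≤ 6) :
    events.foldl stepRank r = min r (Mrank events) := by
  induction events generalizing r with
  | nil => simpa [Mrank] using (min_eq_left h).symm
  | cons e es ih =>
    have hle : stepRank r e ≤ 6 := by
      rw [step_eq_min r e h]; omega
    simp only [List.foldl_cons, Mrank, List.foldr_cons]
    rw [ih _ hle, step_eq_min r e h]
    show min (min r (gRank e)) (Mrank es) = _
    rw [min_assoc]; rfl

lemma Mrank_le_six (events : List (List (String × String))) : Mrank events ≤ 6 := by
  induction events with
  | nil => simp [Mrank]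
  | cons e es ih => simp only [Mrank, List.foldr_cons] at *; omega

lemma Mrank_le_g {events : List (List (String × String))} {e : List (String × String)}
    (he : e ∈ events) : Mrank events ≤ gRank e := by
  induction events with
  | nil => cases he
  | cons a es ih =>
    rcases List.mem_cons.mp he with h | h
    · subst h; simp only [Mrank, List.foldr_cons]; omega
    · have := ih h; simp only [Mrank, List.foldr_cons] at *; omega

lemma le_Mrank {events : List (List (String × String))} {k : Nat} (hk : k ≤ 6)
    (h : ∀ e ∈ events, k ≤ gRank e) : k ≤ Mrank events := by
  induction events with
  | nil => simpa [Mrank] using hk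
  | cons a es ih =>
    have h1 := h a (List.mem_cons_self ..)
    have h2 := ih fun e he => h e (List.mem_cons_of_mem _ he)
    simp only [Mrank, List.foldr_cons] at *; omega

lemma mem_reasonsOf {events : List (List (String × String))} {s : String} :
    s ∈ reasonsOf events ↔ s ≠ "" ∧ ∃ e ∈ events, evGet e "reason" = some s := by
  unfold reasonsOf
  rw [PySem.Set.mem_ofList _ _, List.mem_filterMap]
  constructor
  · rintro ⟨e, he, hf⟩
    cases hR : evGet e "reason" with
    | none => rw [hR] at hf; cases hf
    | some t =>
      rw [hR] at hf
      by_cases ht : t = "" <;> simp [ht] at hf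
      exact ⟨hf ▸ ht, e, he, hf ▸ hR⟩
  · rintro ⟨hs, e, he, hR⟩
    exact ⟨e, he, by rw [hR]; simp [hs]⟩

lemma contains_reasonsOf {events : List (List (String × String))} {s : String} :
    PySem.Set.contains (reasonsOf events) s = true ↔
      (s ≠ "" ∧ ∃ e ∈ events, evGet e "reason" = some s) := by
  rw [PySem.Set.contains_iff, mem_reasonsOf]

lemma err_iff {events : List (List (String × String))} :
    (!(PySem.Set.inter (reasonsOf events) error_reasons).isEmpty) = true ↔
      ∃ e ∈ events, ∃ r, evGet e "reason" = some r ∧ r ∈ errList := by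
  rw [Bool.not_eq_eq_eq_not, Bool.not_true, List.isEmpty_eq_false_iff_exists_mem]
  constructor
  · rintro ⟨x, hx⟩
    have hx' := (PySem.Set.mem_inter _ _ _).mp hx
    obtain ⟨hxr, hxe⟩ := hx'
    have := (mem_reasonsOf).mp hxr
    obtain ⟨hne, e, he, hR⟩ := this
    have hxl : x ∈ errList := by
      have := (PySem.Set.mem_ofList _ _).mp hxe
      simpa [errList, error_reasons] using this
    exact ⟨e, he, x, hR, hxl⟩
  · rintro ⟨e, he, r, hR, hrl⟩
    have hne : r ≠ "" := by
      simp only [errList, List.mem_cons, List.mem_singleton] at hrl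
      rcases hrl with h|h|h|h|h|h <;> first | (subst h; decide) | cases h
    refine ⟨r, (PySem.Set.mem_inter _ _ _).mpr ⟨(mem_reasonsOf).mpr ⟨hne, e, he, hR⟩, ?_⟩⟩
    show r ∈ error_reasons
    rw [error_reasons, PySem.Set.mem_ofList]
    simpa [errList] using hrl

lemma warn_iff {events : List (List (String × String))} :
    (events.any (fun e => evGet e "type" == some "Warning")) = true ↔
      ∃ e ∈ events, evGet e "type" = some "Warning" := by
  rw [List.any_eq_true]
  simp only [beq_iff_eq]

lemma rk_err {r : String} (h : r ∈ errList) : rk r = 0 := by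
  unfold rk; rw [if_pos h]

lemma M_le_of_reason {events : List (List (String × String))} {e : List (String × String)}
    {r : String} (he : e ∈ events) (hR : evGet e "reason" = some r) :
    Mrank events ≤ rk r := by
  refine le_trans (Mrank_le_g he) ?_
  unfold gRank; rw [hR]
  exact min_le_right _ _

lemma g_ge {events : List (List (String × String))} (k : Nat) (hk : k ≤ 6)
    (hnW : ¬ ∃ e ∈ events, evGet e "type" = some "Warning")
    (hnE : ¬ ∃ e ∈ events, ∃ r, evGet e "reason" = some r ∧ r ∈ errList)
    (hS : 2 ≤ k → ¬ ∃ e ∈ events, evGet e "reason" = some "Started")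
    (hC : 3 ≤ k → ¬ ∃ e ∈ events, evGet e "reason" = some "Created")
    (hP : 4 ≤ k → ¬ ∃ e ∈ events, evGet e "reason" = some "Pulled")
    (hPg : 5 ≤ k → ¬ ∃ e ∈ events, evGet e "reason" = some "Pulling")
    (hSc : 6 ≤ k → ¬ ∃ e ∈ events, evGet e "reason" = some "Scheduled") :
    k ≤ Mrank events := by
  apply le_Mrank hk
  intro e he
  unfold gRank
  have hw : (evGet e "type" == some "Warning") = false :=
    beq_eq_false_iff_ne.mpr (fun h => hnW ⟨e, he, h⟩)
  rw [hw]
  cases hR : evGet e "reason" with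
  | none => simpa using hk
  | some r =>
    have h0 : r ∉ errList := fun hm => hnE ⟨e, he, r, hR, hm⟩
    simp only [Bool.false_eq_true, if_false]
    unfold rk
    split_ifs with a b c d f
    · by_cases h2 : 2 ≤ k
      · exact absurd ⟨e, he, a ▸ hR⟩ (hS h2)
      · omega
    · by_cases h3 : 3 ≤ k
      · exact absurd ⟨e, he, b ▸ hR⟩ (hC h3)
      · omega
    · by_cases h4 : 4 ≤ k
      · exact absurd ⟨e, he, c ▸ hR⟩ (hP h4)
      · omega
    · by_cases h5 : 5 ≤ k
      · exact absurd ⟨e, he, d ▸ hR⟩ (hPg h5)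
      · omega
    · by_cases h6 : 6 ≤ k
      · exact absurd ⟨e, he, f ▸ hR⟩ (hSc h6)
      · omega
    · omega

-- ===== VERDICT (by name: the statement is the Claim_ definition above) =====
theorem derive_deployment_phase_spec : Claim_equal_derive_deployment_phase := by
  intro events _
  unfold Spec_derive_deployment_phase derive_deployment_phase derive_deployment_phase_alt
  rw [foldl_step events 6 (by omega), min_eq_right (Mrank_le_six events)]
  by_cases hE : (∃ e ∈ events, ∃ r, evGet e "reason" = some r ∧ r ∈ errList) ∨
      (∃ e ∈ events, evGet e "type" = some "Warning")
  · have hcond : (!(PySem.Set.inter (reasonsOf events) error_reasons).isEmpty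
        || events.any fun e => evGet e "type" == some "Warning") = true := by
      rw [Bool.or_eq_true]
      rcases hE with h | h
      · exact Or.inl (err_iff.mpr h)
      · exact Or.inr (warn_iff.mpr h)
    simp only [hcond, if_true]
    have hM : Mrank events = 0 := by
      apply Nat.le_antisymm _ (Nat.zero_le _)
      rcases hE with ⟨e, he, r, hR, hrl⟩ | ⟨e, he, hw⟩
      · exact le_trans (M_le_of_reason he hR) (le_of_eq (rk_err hrl))
      · refine le_trans (Mrank_le_g he) ?_
        unfold gRank; rw [hw]; simp
    rw [hM]; rfl
  · push_neg at hE
    obtain ⟨hnE, hnW⟩ := hE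
    have hnE' : ¬ ∃ e ∈ events, ∃ r, evGet e "reason" = some r ∧ r ∈ errList := by
      rintro ⟨e, he, r, hR, hrl⟩; exact (hnE e he r hR) hrl
    have hnW' : ¬ ∃ e ∈ events, evGet e "type" = some "Warning" := by
      rintro ⟨e, he, h⟩; exact hnW e he h
    have hcond : (!(PySem.Set.inter (reasonsOf events) error_reasons).isEmpty
        || events.any fun e => evGet e "type" == some "Warning") = false := by
      rw [Bool.or_eq_false_iff]
      constructor
      · rw [Bool.eq_false_iff]; intro h; exact hnE' (err_iff.mp h)
      · rw [Bool.eq_false_iff]; intro h; exact hnW' (warn_iff.mp h)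
    simp only [hcond, Bool.false_eq_true, if_false]
    by_cases hS : ∃ e ∈ events, evGet e "reason" = some "Started"
    · have hc : PySem.Set.contains (reasonsOf events) "Started" = true :=
        contains_reasonsOf.mpr ⟨by decide, hS⟩
      simp only [hc, if_true]
      obtain ⟨e, he, hR⟩ := hS
      have hM : Mrank events = 1 := by
        refine Nat.le_antisymm (le_trans (M_le_of_reason he hR) (by decide)) ?_
        exact g_ge 1 (by omega) hnW' hnE' (by omega) (by omega) (by omega) (by omega) (by omega)
      rw [hM]; rfl
    · have hc : PySem.Set.contains (reasonsOf events) "Started" = false := by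
        rw [Bool.eq_false_iff]; intro h; exact hS (contains_reasonsOf.mp h).2
      simp only [hc, Bool.false_eq_true, if_false]
      by_cases hC : ∃ e ∈ events, evGet e "reason" = some "Created"
      · have hc2 : PySem.Set.contains (reasonsOf events) "Created" = true :=
          contains_reasonsOf.mpr ⟨by decide, hC⟩
        simp only [hc2, if_true]
        obtain ⟨e, he, hR⟩ := hC
        have hM : Mrank events = 2 := by
          refine Nat.le_antisymm (le_trans (M_le_of_reason he hR) (by decide)) ?_
          exact g_ge 2 (by omega) hnW' hnE' (fun _ => hS) (by omega) (by omega) (by omega) (by omega)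
        rw [hM]; rfl
      · have hc2 : PySem.Set.contains (reasonsOf events) "Created" = false := by
          rw [Bool.eq_false_iff]; intro h; exact hC (contains_reasonsOf.mp h).2
        simp only [hc2, Bool.false_eq_true, if_false]
        by_cases hP : ∃ e ∈ events, evGet e "reason" = some "Pulled"
        · have hc3 : PySem.Set.contains (reasonsOf events) "Pulled" = true :=
            contains_reasonsOf.mpr ⟨by decide, hP⟩
          simp only [hc3, if_true]
          obtain ⟨e, he, hR⟩ := hP
          have hM : Mrank events = 3 := by
            refine Nat.le_antisymm (le_trans (M_le_of_reason he hR) (by decide)) ?_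
            exact g_ge 3 (by omega) hnW' hnE' (fun _ => hS) (fun _ => hC) (by omega) (by omega) (by omega)
          rw [hM]; rfl
        · have hc3 : PySem.Set.contains (reasonsOf events) "Pulled" = false := by
            rw [Bool.eq_false_iff]; intro h; exact hP (contains_reasonsOf.mp h).2
          simp only [hc3, Bool.false_eq_true, if_false]
          by_cases hPg : ∃ e ∈ events, evGet e "reason" = some "Pulling"
          · have hc4 : PySem.Set.contains (reasonsOf events) "Pulling" = true :=
              contains_reasonsOf.mpr ⟨by decide, hPg⟩
            simp only [hc4, if_true]
            obtain ⟨e, he, hR⟩ := hPg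
            have hM : Mrank events = 4 := by
              refine Nat.le_antisymm (le_trans (M_le_of_reason he hR) (by decide)) ?_
              exact g_ge 4 (by omega) hnW' hnE' (fun _ => hS) (fun _ => hC) (fun _ => hP) (by omega) (by omega)
            rw [hM]; rfl
          · have hc4 : PySem.Set.contains (reasonsOf events) "Pulling" = false := by
              rw [Bool.eq_false_iff]; intro h; exact hPg (contains_reasonsOf.mp h).2
            simp only [hc4, Bool.false_eq_true, if_false]
            by_cases hSc : ∃ e ∈ events, evGet e "reason" = some "Scheduled"
            · have hc5 : PySem.Set.contains (reasonsOf events) "Scheduled" = true :=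
                contains_reasonsOf.mpr ⟨by decide, hSc⟩
              simp only [hc5, if_true]
              obtain ⟨e, he, hR⟩ := hSc
              have hM : Mrank events = 5 := by
                refine Nat.le_antisymm (le_trans (M_le_of_reason he hR) (by decide)) ?_
                exact g_ge 5 (by omega) hnW' hnE' (fun _ => hS) (fun _ => hC) (fun _ => hP) (fun _ => hPg) (by omega)
              rw [hM]; rfl
            · have hc5 : PySem.Set.contains (reasonsOf events) "Scheduled" = false := by
                rw [Bool.eq_false_iff]; intro h; exact hSc (contains_reasonsOf.mp h).2
              simp only [hc5, Bool.false_eq_true, if_false]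
              have hM : Mrank events = 6 := by
                refine Nat.le_antisymm (Mrank_le_six _) ?_
                exact g_ge 6 (by omega) hnW' hnE' (fun _ => hS) (fun _ => hC) (fun _ => hP) (fun _ => hPg) (fun _ => hSc)
              rw [hM]; rfl
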